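-- pv_equiv track=rewrite | github.com/shinehhht/NeuralExecutionMachine | src/isa/isa_parse.py | decode_instruction
-- ===== SOURCE A (Python) =====
-- def decode_instruction(instruction, field_order):
--     total_bits = sum([width for width in field_order.values()])
--     bit_offest = 0
--     fields = {}
--
--     for name,width in field_order.items():
--         shift = total_bits - bit_offest - width
--         mask = (1 << width) - 1
--         fields[name] = ((instruction >> shift) & mask)
--         bit_offest += width
--
--     return fields
-- ===== SOURCE B (Python) =====
-- def decode_instruction(instruction, field_order):
--     remaining = instruction
--     pairs = []
--     for name, width in reversed(list(field_order.items())):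
--         mask = (1 << width) - 1
--         pairs.append((name, remaining & mask))
--         remaining >>= width
--     return dict(reversed(pairs))
-- ===== Notes on version B (the rewrite author's own statement) =====
-- stated objective: simpler
-- what changed: B walks the fields from the least-significant end keeping a shifting remainder register (mask low bits, then shift right by the field width), instead of A's precomputed total_bits and absolute per-field shift offsets.
import Mathlib
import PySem

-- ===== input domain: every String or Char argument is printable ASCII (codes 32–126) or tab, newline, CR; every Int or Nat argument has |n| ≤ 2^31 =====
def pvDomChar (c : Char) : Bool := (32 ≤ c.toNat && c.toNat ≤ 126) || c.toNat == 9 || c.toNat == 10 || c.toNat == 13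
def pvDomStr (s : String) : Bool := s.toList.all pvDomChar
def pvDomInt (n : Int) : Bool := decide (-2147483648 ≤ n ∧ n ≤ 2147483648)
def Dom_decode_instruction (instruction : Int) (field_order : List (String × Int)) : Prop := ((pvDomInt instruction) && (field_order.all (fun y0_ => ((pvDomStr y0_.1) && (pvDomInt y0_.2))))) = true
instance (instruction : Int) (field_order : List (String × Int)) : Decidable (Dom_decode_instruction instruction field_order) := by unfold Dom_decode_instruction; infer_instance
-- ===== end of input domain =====

-- B decodes from the least-significant end with a shifting remainder register instead of
-- A's total-bits precomputation and absolute per-field shifts (objective: simpler).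

-- shared primitives of both ports:
-- Python's '(1 << w) - 1' ; the '.toNat' is exact for w ≥ 0 (a negative w makes Python raise
-- ValueError — outside Pre_), and Python's 'x >> s' (arithmetic shift, = Lean's '>>>' on Int),
-- exact for s ≥ 0 (negative s raises — outside Pre_).
def pyMask (w : Int) : Int := ((1 : Int) <<< w.toNat) - 1
def pyShr (x s : Int) : Int := x >>> s.toNat

-- ===== PORT A =====
def decode_instruction (instruction : Int) (field_order : List (String × Int)) : List (String × Int) :=
  let total_bits := (field_order.map (fun p => p.2)).sum
  let st := field_order.foldl
    (fun (st : Int × PySem.Dict String Int) p =>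
      let shift := total_bits - st.1 - p.2
      (st.1 + p.2, st.2.insert p.1 (PySem.Int.band (pyShr instruction shift) (pyMask p.2))))
    ((0 : Int), PySem.Dict.empty)
  st.2.items

-- ===== PORT B =====
-- state = (pairs collected so far, remaining register); 'dict(reversed(pairs))' is
-- PySem.Dict.ofList of the reversed pair list.
def decode_instruction_alt (instruction : Int) (field_order : List (String × Int)) : List (String × Int) :=
  let st := field_order.reverse.foldl
    (fun (st : List (String × Int) × Int) p =>
      (st.1 ++ [(p.1, PySem.Int.band st.2 (pyMask p.2))], pyShr st.2 p.2))
    (([] : List (String × Int)), instruction)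
  (PySem.Dict.ofList st.1.reverse).items

-- ===== PRECONDITION & SPEC =====
-- Pre_ excludes (a) negative field widths, on which A raises ValueError at '1 << width', and
-- (b) duplicate field names, which cannot occur in A's Python dict argument (the assoc list
-- must be a genuine dict).
def Pre_decode_instruction (instruction : Int) (field_order : List (String × Int)) : Prop :=
  (∀ p ∈ field_order, 0 ≤ p.2) ∧ (field_order.map Prod.fst).Nodup
instance (instruction : Int) (field_order : List (String × Int)) : Decidable (Pre_decode_instruction instruction field_order) := by unfold Pre_decode_instruction; infer_instance

def pvWitness_decode_instruction : Int × (List (String × Int)) := (37, [("op", 2), ("rd", 3), ("imm", 4)])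

def Spec_decode_instruction (instruction : Int) (field_order : List (String × Int)) (out : List (String × Int)) : Prop := out = decode_instruction_alt instruction field_order
instance (instruction : Int) (field_order : List (String × Int)) (out : List (String × Int)) : Decidable (Spec_decode_instruction instruction field_order out) := by unfold Spec_decode_instruction; infer_instance

-- ===== CLAIM (what is proved, stated in full; the proofs are below) =====
def Claim_equal_decode_instruction : Prop := ∀ (instruction : Int) (field_order : List (String × Int)), Dom_decode_instruction instruction field_order → Pre_decode_instruction instruction field_order → Spec_decode_instruction instruction field_order (decode_instruction instruction field_order)

-- ===== LEMMAS AND PROOFS =====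

-- sum of the widths
def pvWsum (l : List (String × Int)) : Int := (l.map (fun p => p.2)).sum

-- the common closed form of both loops: field i holds (instruction >> sum of later widths) & mask
def pvSpecMap (x : Int) : List (String × Int) → List (String × Int)
  | [] => []
  | (n, w) :: rest => (n, PySem.Int.band (pyShr x (pvWsum rest)) (pyMask w)) :: pvSpecMap x rest

lemma pvWsum_cons (n : String) (w : Int) (rest : List (String × Int)) :
    pvWsum ((n, w) :: rest) = w + pvWsum rest := by
  simp [pvWsum]

lemma pvWsum_nonneg (l : List (String × Int)) (h : ∀ p ∈ l, 0 ≤ p.2) : 0 ≤ pvWsum l := by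
  induction l with
  | nil => simp [pvWsum]
  | cons p rest ih =>
      have h1 := h p (by simp)
      have h2 := ih (fun q hq => h q (by simp [hq]))
      cases p
      rw [pvWsum_cons]
      omega

lemma pyShr_pyShr (x a b : Int) (ha : 0 ≤ a) (hb : 0 ≤ b) :
    pyShr (pyShr x a) b = pyShr x (a + b) := by
  unfold pyShr
  rw [← Int.shiftRight_add]
  congr 1
  omega

lemma pvSpecMap_keys (x : Int) (l : List (String × Int)) :
    (pvSpecMap x l).map Prod.fst = l.map Prod.fst := by
  induction l with
  | nil => rfl
  | cons p rest ih => cases p; simp [pvSpecMap, ih]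

-- A's loop: the dict accumulates exactly pvSpecMap, for any starting offset with
-- total - off = pvWsum l and any dict fresh for l's keys.
lemma pvA_fold (x total : Int) (l : List (String × Int)) :
    ∀ (off : Int) (d : PySem.Dict String Int),
    total - off = pvWsum l →
    (∀ p ∈ l, d.contains p.1 = false) → (l.map Prod.fst).Nodup →
    (l.foldl
      (fun (st : Int × PySem.Dict String Int) p =>
        (st.1 + p.2, st.2.insert p.1 (PySem.Int.band (pyShr x (total - st.1 - p.2)) (pyMask p.2))))
      (off, d)).2.items = d.items ++ pvSpecMap x l := by
  induction l with
  | nil => intro off d _ _ _; simp [pvSpecMap]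
  | cons p rest ih =>
      rcases p with ⟨n, w⟩
      intro off d hsum hfresh hnd
      have hshift : total - off - w = pvWsum rest := by
        rw [pvWsum_cons] at hsum; omega
      have hdn : d.contains n = false := hfresh (n, w) (by simp)
      simp only [List.foldl_cons]
      have hnd' : (rest.map Prod.fst).Nodup := (List.nodup_cons.mp (by simpa using hnd)).2
      refine (ih (off + w) _ (by rw [pvWsum_cons] at hsum; omega) ?_ hnd').trans ?_
      · intro q hq
        rw [PySem.Dict.contains_insert]
        have hne : q.1 ≠ n := by
          simp only [List.map_cons, List.nodup_cons] at hnd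
          intro he; exact hnd.1 (he ▸ List.mem_map_of_mem hq)
        simp [hne, hfresh q (by simp [hq])]
      · rw [PySem.Dict.items_insert_of_not_contains (h := hdn), hshift]
        simp [pvSpecMap]

-- B's loop over the reversed list: pairs are pvSpecMap reversed, the register is
-- instruction shifted by the total processed width.
lemma pvB_fold (x : Int) (l : List (String × Int)) (hw : ∀ p ∈ l, 0 ≤ p.2) :
    (l.reverse.foldl
      (fun (st : List (String × Int) × Int) p =>
        (st.1 ++ [(p.1, PySem.Int.band st.2 (pyMask p.2))], pyShr st.2 p.2))
      (([] : List (String × Int)), x))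
    = ((pvSpecMap x l).reverse, pyShr x (pvWsum l)) := by
  rw [List.foldl_reverse]
  induction l with
  | nil => simp [pvSpecMap, pvWsum, pyShr]
  | cons p rest ih =>
      rcases p with ⟨n, w⟩
      have hw0 : 0 ≤ w := hw (n, w) (by simp)
      have hr := pvWsum_nonneg rest (fun q hq => hw q (by simp [hq]))
      rw [List.foldr_cons, ih (fun q hq => hw q (by simp [hq]))]
      rw [pyShr_pyShr x (pvWsum rest) w hr hw0]
      rw [pvWsum_cons]
      simp [pvSpecMap, Int.add_comm]

-- dict(pairs) with pairwise-distinct keys has exactly those items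
lemma pv_items_ofList (l : List (String × Int)) (h : (l.map Prod.fst).Nodup) :
    (PySem.Dict.ofList l).items = l := by
  have := PySem.Dict.items_foldl_insert_fresh (d := (PySem.Dict.empty : PySem.Dict String Int))
    (l := l) (k := Prod.fst) (v := Prod.snd) (by simp) (by simpa using h)
  simpa [PySem.Dict.ofList, PySem.Dict.update] using this

-- ===== VERDICT (by name: the statement is the Claim_ definition above) =====
theorem decode_instruction_spec : Claim_equal_decode_instruction := by
  intro x l _ hpre
  rcases hpre with ⟨hw, hnd⟩
  unfold Spec_decode_instruction decode_instruction decode_instruction_alt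
  simp only [pvB_fold x l hw]
  have hA := pvA_fold x (pvWsum l) l 0 PySem.Dict.empty (by omega)
    (fun p _ => PySem.Dict.contains_empty p.1) hnd
  simp only [pvWsum] at hA
  simp only [hA, List.reverse_reverse]
  rw [pv_items_ofList _ (by rw [pvSpecMap_keys]; exact hnd)]
  simp [PySem.Dict.empty]
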